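-- pv_equiv track=rewrite | github.com/Stuuu223/MyQuantTool | logic/capital_classifier.py | _get_consecutive_inflow_days
-- ===== SOURCE A (Python) =====
-- from typing import List, Dict, Any, Optional
--
-- def _get_consecutive_inflow_days(daily_data: List[Dict[str, Any]]) -> int:
--     """计算从最近一天开始的连续流入天数"""
--     consecutive = 0
--     for i in range(len(daily_data) - 1, -1, -1):
--         if daily_data[i].get('institution', 0) > 0:
--             consecutive += 1
--         else:
--             break
--     return consecutive
-- ===== SOURCE B (Python) =====
-- from typing import List, Dict, Any
--
-- def _get_consecutive_inflow_days(daily_data: List[Dict[str, Any]]) -> int: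
--     """Forward scan with a running counter: reset on a non-inflow day."""
--     run = 0
--     for day in daily_data:
--         if day.get('institution', 0) > 0:
--             run += 1
--         else:
--             run = 0
--     return run
-- ===== Notes on version B (the rewrite author's own statement) =====
-- stated objective: alternative
-- what changed: Backward iteration with an early break is replaced by a single forward pass keeping a running counter that resets to 0 on a non-inflow day; the counter after the loop is the trailing run length.
import Mathlib
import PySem

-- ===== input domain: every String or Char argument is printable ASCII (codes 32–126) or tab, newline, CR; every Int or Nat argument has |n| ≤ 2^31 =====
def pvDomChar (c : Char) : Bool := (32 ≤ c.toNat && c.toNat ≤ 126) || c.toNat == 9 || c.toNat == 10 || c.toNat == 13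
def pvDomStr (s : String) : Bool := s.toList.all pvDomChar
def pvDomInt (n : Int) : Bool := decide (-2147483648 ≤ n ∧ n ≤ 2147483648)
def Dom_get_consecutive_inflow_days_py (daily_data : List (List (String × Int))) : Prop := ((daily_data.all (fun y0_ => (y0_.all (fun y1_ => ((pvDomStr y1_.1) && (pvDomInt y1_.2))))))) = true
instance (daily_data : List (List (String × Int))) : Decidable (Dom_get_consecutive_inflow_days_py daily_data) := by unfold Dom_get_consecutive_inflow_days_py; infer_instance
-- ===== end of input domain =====

-- B replaces A's backward loop with early break by a forward pass with a reset-to-zero counter (alternative decomposition, same cost).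

-- ===== PORT A =====
-- day.get('institution', 0) > 0 — shared predicate of both Pythons
def pvInflow (day : List (String × Int)) : Bool :=
  decide (0 < (PySem.Dict.ofList day).getD "institution" 0)

-- A walks indices len-1 … 0, incrementing until the first non-inflow day (break);
-- that is exactly: consume the REVERSED list until the predicate fails.
def pvCountA : List (List (String × Int)) → Int
  | [] => 0
  | d :: rest => if pvInflow d then pvCountA rest + 1 else 0

def get_consecutive_inflow_days_py (daily_data : List (List (String × Int))) : Int :=
  pvCountA daily_data.reverse

-- ===== PORT B =====
def get_consecutive_inflow_days_py_alt (daily_data : List (List (String × Int))) : Int :=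
  daily_data.foldl (fun run d => if pvInflow d then run + 1 else 0) 0

-- ===== PRECONDITION & SPEC =====
def Spec_get_consecutive_inflow_days_py (daily_data : List (List (String × Int))) (out : Int) : Prop := out = get_consecutive_inflow_days_py_alt daily_data
instance (daily_data : List (List (String × Int))) (out : Int) : Decidable (Spec_get_consecutive_inflow_days_py daily_data out) := by unfold Spec_get_consecutive_inflow_days_py; infer_instance

-- ===== CLAIM (what is proved, stated in full; the proofs are below) =====
def Claim_equal_get_consecutive_inflow_days_py : Prop := ∀ (daily_data : List (List (String × Int))), Dom_get_consecutive_inflow_days_py daily_data → Spec_get_consecutive_inflow_days_py daily_data (get_consecutive_inflow_days_py daily_data)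

-- ===== LEMMAS AND PROOFS =====
theorem pvFoldl_eq_countA_reverse (l : List (List (String × Int))) :
    l.foldl (fun run d => if pvInflow d then run + 1 else 0) 0 = pvCountA l.reverse := by
  induction l using List.reverseRecOn with
  | nil => rfl
  | append_singleton xs d ih =>
      rw [List.foldl_append, List.reverse_append]
      simp only [List.foldl_cons, List.foldl_nil, List.reverse_singleton, List.singleton_append,
        pvCountA]
      by_cases h : pvInflow d = true
      · simp [h, ih]
      · simp [h]

-- ===== VERDICT (by name: the statement is the Claim_ definition above) =====
theorem get_consecutive_inflow_days_py_spec : Claim_equal_get_consecutive_inflow_days_py := by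
  intro l _
  unfold Spec_get_consecutive_inflow_days_py get_consecutive_inflow_days_py
    get_consecutive_inflow_days_py_alt
  exact (pvFoldl_eq_countA_reverse l).symm
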